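-- pv_equiv track=rewrite | github.com/gregorysharkov/interactivebrockers | dummy_algo/dummy_algo.py | calculate_start_end
-- ===== SOURCE A (Python) =====
-- def calculate_start_end(start, idle_times, open_times):
--     """
--     Function calculates start and end times based on idle and open_times intervals
--     """
--     n_intervals = len(idle_times)
--     current_time = start
--     positions = []
--     for i in range(n_intervals):
--         buy_time = current_time + idle_times[i]
--         sell_time = buy_time + open_times[i]
--         current_time = sell_time
--         positions.append([buy_time, sell_time])
--
--     return positions
-- ===== SOURCE B (Python) =====
-- def calculate_start_end(start, idle_times, open_times):
--     """
--     Function calculates start and end times based on idle and open_times intervals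
--     """
--     flat = []
--     for i in range(len(idle_times)):
--         flat.append(idle_times[i])
--         flat.append(open_times[i])
--     cum = [start]
--     for d in flat:
--         cum.append(cum[-1] + d)
--     return [[cum[2 * k + 1], cum[2 * k + 2]] for k in range(len(idle_times))]
-- ===== Notes on version B (the rewrite author's own statement) =====
-- stated objective: alternative
-- what changed: Instead of one accumulate-and-emit loop carrying current_time, B flattens idle/open durations into one interleaved list, builds the running-sum table over it, and then pairs its odd/even entries into [buy, sell] rows.
import Mathlib
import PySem

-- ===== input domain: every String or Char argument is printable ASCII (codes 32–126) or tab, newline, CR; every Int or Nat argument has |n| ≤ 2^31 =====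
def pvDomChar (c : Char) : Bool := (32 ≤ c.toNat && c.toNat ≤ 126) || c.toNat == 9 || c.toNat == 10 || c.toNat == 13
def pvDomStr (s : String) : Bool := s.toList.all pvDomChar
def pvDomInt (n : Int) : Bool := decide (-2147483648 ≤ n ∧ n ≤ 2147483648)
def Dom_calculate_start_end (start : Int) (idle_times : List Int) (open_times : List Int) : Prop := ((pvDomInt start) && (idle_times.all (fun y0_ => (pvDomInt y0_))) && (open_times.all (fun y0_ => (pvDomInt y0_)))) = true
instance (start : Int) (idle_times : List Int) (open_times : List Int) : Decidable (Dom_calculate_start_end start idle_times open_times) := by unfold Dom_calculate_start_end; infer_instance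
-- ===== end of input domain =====

-- B replaces A's single accumulate-and-emit loop by a flat interleaved duration list,
-- a running-sum table over it, and an odd/even pairing pass (alternative decomposition).


-- ===== PORT A =====
-- literal port of A: one loop over range(len(idle_times)) threading current_time and positions
def calculate_start_end (start : Int) (idle_times : List Int) (open_times : List Int) : List (List Int) :=
  let n_intervals := idle_times.length
  let r := (List.range n_intervals).foldl
    (fun (st : Int × List (List Int)) i =>
      let buy_time := st.1 + idle_times.getD i 0      -- in range for all i < n_intervals
      let sell_time := buy_time + open_times.getD i 0 -- Pre_ makes this index in range (else Python raises)
      (sell_time, st.2 ++ [[buy_time, sell_time]]))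
    (start, [])
  r.2

-- ===== PORT B =====
-- literal port of Source B: build flat interleaved list, prefix-sum table cum, pair odd/even entries
def calculate_start_end_alt (start : Int) (idle_times : List Int) (open_times : List Int) : List (List Int) :=
  let flat := (List.range idle_times.length).foldl
    (fun (acc : List Int) i => acc ++ [idle_times.getD i 0] ++ [open_times.getD i 0]) []
  let cum := flat.foldl (fun (c : List Int) d => c ++ [c.getLastD 0 + d]) [start]
  (List.range idle_times.length).map (fun k => [cum.getD (2 * k + 1) 0, cum.getD (2 * k + 2) 0])

-- ===== PRECONDITION & SPEC =====
-- Pre_ excludes exactly the inputs where Python A raises IndexError: open_times shorter than idle_times.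
def Pre_calculate_start_end (start : Int) (idle_times : List Int) (open_times : List Int) : Prop :=
  idle_times.length ≤ open_times.length
instance (start : Int) (idle_times : List Int) (open_times : List Int) : Decidable (Pre_calculate_start_end start idle_times open_times) := by unfold Pre_calculate_start_end; infer_instance
def pvWitness_calculate_start_end : Int × List Int × List Int := (5, [1, 2], [3, 4])

def Spec_calculate_start_end (start : Int) (idle_times : List Int) (open_times : List Int) (out : List (List Int)) : Prop := out = calculate_start_end_alt start idle_times open_times
instance (start : Int) (idle_times : List Int) (open_times : List Int) (out : List (List Int)) : Decidable (Spec_calculate_start_end start idle_times open_times out) := by unfold Spec_calculate_start_end; infer_instance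

-- ===== CLAIM (what is proved, stated in full; the proofs are below) =====
def Claim_equal_calculate_start_end : Prop := ∀ (start : Int) (idle_times : List Int) (open_times : List Int), Dom_calculate_start_end start idle_times open_times → Pre_calculate_start_end start idle_times open_times → Spec_calculate_start_end start idle_times open_times (calculate_start_end start idle_times open_times)

-- ===== LEMMAS AND PROOFS =====

-- Reference function: the pairs both programs compute, recursively from the front.
def gRef (cur : Int) : List Int → List Int → List (List Int)
  | [], _ => []
  | x :: xs, ys =>
      let b := cur + x
      let s := b + ys.headD 0
      [b, s] :: gRef s xs ys.tail

-- tail of the running-sum table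
def tailPref (s : Int) : List Int → List Int
  | [] => []
  | d :: ds => (s + d) :: tailPref (s + d) ds

-- interleaved flat list (with Python's getD-0 reading for short open_times, which Pre_ rules out)
def interleave : List Int → List Int → List Int
  | [], _ => []
  | x :: xs, ys => x :: ys.headD 0 :: interleave xs ys.tail

theorem A_loop (xs : List Int) : ∀ (ys : List Int) (cur : Int) (acc : List (List Int)),
    ((List.range xs.length).foldl
      (fun (st : Int × List (List Int)) i =>
        let b := st.1 + xs.getD i 0
        let s := b + ys.getD i 0
        (s, st.2 ++ [[b, s]])) (cur, acc)).2 = acc ++ gRef cur xs ys := by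
  induction xs with
  | nil => intro ys cur acc; simp [gRef]
  | cons x xs ih =>
      intro ys cur acc
      rw [show (x :: xs).length = xs.length + 1 from rfl, List.range_succ_eq_map, List.foldl_cons,
        List.foldl_map]
      have h : ∀ (i : ℕ), (x :: xs).getD (i + 1) 0 = xs.getD i 0 := fun i => rfl
      have h2 : ∀ (i : ℕ), ys.getD (i + 1) 0 = ys.tail.getD i 0 := by
        intro i; cases ys <;> simp
      simp only [h, h2, List.getD_cons_zero]
      have hy : ys.getD 0 0 = ys.headD 0 := by cases ys <;> rfl
      rw [hy]
      rw [ih ys.tail (cur + x + ys.headD 0) (acc ++ [[cur + x, cur + x + ys.headD 0]])]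
      simp [gRef]

theorem B_flat (xs : List Int) : ∀ (ys : List Int) (acc : List Int),
    (List.range xs.length).foldl
      (fun (acc : List Int) i => acc ++ [xs.getD i 0] ++ [ys.getD i 0]) acc
      = acc ++ interleave xs ys := by
  induction xs with
  | nil => intro ys acc; simp [interleave]
  | cons x xs ih =>
      intro ys acc
      rw [show (x :: xs).length = xs.length + 1 from rfl, List.range_succ_eq_map, List.foldl_cons,
        List.foldl_map]
      have h : ∀ (i : ℕ), (x :: xs).getD (i + 1) 0 = xs.getD i 0 := fun i => rfl
      have h2 : ∀ (i : ℕ), ys.getD (i + 1) 0 = ys.tail.getD i 0 := by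
        intro i; cases ys <;> simp
      simp only [h, h2, List.getD_cons_zero]
      have hy : ys.getD 0 0 = ys.headD 0 := by cases ys <;> rfl
      rw [hy, ih ys.tail (acc ++ [x] ++ [ys.headD 0])]
      simp [interleave]

theorem B_cum (ds : List Int) : ∀ (c : List Int),
    ds.foldl (fun (c : List Int) d => c ++ [c.getLastD 0 + d]) c
      = c ++ tailPref (c.getLastD 0) ds := by
  induction ds with
  | nil => simp [tailPref]
  | cons d ds ih =>
      intro c
      rw [List.foldl_cons, ih (c ++ [c.getLastD 0 + d])]
      simp [tailPref]

theorem pair_pass (xs : List Int) : ∀ (ys : List Int) (cur : Int),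
    (List.range xs.length).map
      (fun k => [(cur :: tailPref cur (interleave xs ys)).getD (2 * k + 1) 0,
                 (cur :: tailPref cur (interleave xs ys)).getD (2 * k + 2) 0])
      = gRef cur xs ys := by
  induction xs with
  | nil => intro ys cur; simp [gRef]
  | cons x xs ih =>
      intro ys cur
      rw [show (x :: xs).length = xs.length + 1 from rfl, List.range_succ_eq_map, List.map_cons,
        List.map_map]
      have hcum : cur :: tailPref cur (interleave (x :: xs) ys)
          = cur :: (cur + x) :: (cur + x + ys.headD 0)
              :: tailPref (cur + x + ys.headD 0) (interleave xs ys.tail) := by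
        simp [interleave, tailPref]
      rw [hcum]
      congr 1
      rw [← ih ys.tail (cur + x + ys.headD 0)]
      apply List.map_congr_left
      intro k _
      have e1 : 2 * (k + 1) + 1 = (2 * k + 1) + 1 + 1 := by ring
      have e2 : 2 * (k + 1) + 2 = (2 * k + 2) + 1 + 1 := by ring
      simp [Function.comp, e1, e2]

-- ===== VERDICT (by name: the statement is the Claim_ definition above) =====
theorem calculate_start_end_spec : Claim_equal_calculate_start_end := by
  intro start xs ys _ _
  unfold Spec_calculate_start_end calculate_start_end calculate_start_end_alt
  dsimp only
  rw [A_loop xs ys start [], B_flat xs ys []]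
  simp only [List.nil_append]
  rw [B_cum (interleave xs ys) [start]]
  simp only [List.singleton_append]
  exact (pair_pass xs ys start).symm
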